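-- pv_equiv track=rewrite | github.com/gianghh50/funixDSP301x_1.2asm2 | lastname_firstname_grade_the_exams.py | checkMark
-- ===== SOURCE A (Python) =====
-- answer_key = "B,A,D,D,C,B,D,A,C,C,D,B,A,B,A,C,B,D,A,C,A,A,B,D,D"
--
-- def checkMark(_line):
--     mark = 0
--     list_lines = _line.split(',')
--     list_ans = answer_key.split(',')
--     for i in range(1,len(list_lines)):
--         if list_lines[i] == list_ans[i-1]:
--             mark = mark + 4
--         if list_lines[i] != '' and list_lines[i] != list_ans[i-1]:
--             mark = mark - 1
--     return list_lines[0],mark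
-- ===== SOURCE B (Python) =====
-- answer_key = "B,A,D,D,C,B,D,A,C,C,D,B,A,B,A,C,B,D,A,C,A,A,B,D,D"
--
-- def checkMark(_line):
--     parts = _line.split(',')
--     key = answer_key.split(',')
--     answers = parts[1:]
--     correct = sum(a == k for a, k in zip(answers, key))
--     answered = sum(a != '' for a in answers)
--     return parts[0], 5 * correct - answered
-- ===== Notes on version B (the rewrite author's own statement) =====
-- stated objective: simpler
-- what changed: Replaces the indexed loop with two +4/-1 conditional updates by zipping the answers with the key and computing the score in closed form as 5*correct - answered (every correct answer is non-empty, so +4 correct / -1 wrong-nonempty collapses to this).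
import Mathlib
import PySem

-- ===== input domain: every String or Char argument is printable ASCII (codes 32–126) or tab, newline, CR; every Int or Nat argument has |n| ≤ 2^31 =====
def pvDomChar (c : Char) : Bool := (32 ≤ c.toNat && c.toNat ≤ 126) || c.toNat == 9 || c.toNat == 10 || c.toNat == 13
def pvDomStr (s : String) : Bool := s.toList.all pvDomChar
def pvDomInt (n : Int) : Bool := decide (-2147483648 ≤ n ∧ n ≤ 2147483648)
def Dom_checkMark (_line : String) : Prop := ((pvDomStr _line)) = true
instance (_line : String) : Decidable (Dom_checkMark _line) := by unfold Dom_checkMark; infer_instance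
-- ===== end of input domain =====

-- B replaces A's indexed +4/-1 loop by a zip with the key and the closed form 5*correct - answered (objective: simpler).

-- shared module constant (answer_key)
def answerKey : String := "B,A,D,D,C,B,D,A,C,C,D,B,A,B,A,C,B,D,A,C,A,A,B,D,D"

-- s.split(',') — sep is the non-empty literal ",", so Python's split never raises and split? is always `some`; exact.
def splitComma (s : String) : List String := (PySem.Str.split? s ",").getD []

-- ===== PORT A =====
def checkMark (_line : String) : String × Int :=
  let list_lines := splitComma _line
  let list_ans := splitComma answerKey
  let mark := (PySem.List.pyRange 1 (PySem.List.len list_lines) 1).foldl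
    (fun mark i =>
      let a := PySem.List.pyGetD list_lines i ""
      let k := PySem.List.pyGetD list_ans (i - 1) ""
      let mark := if a = k then mark + 4 else mark
      if a ≠ "" ∧ a ≠ k then mark - 1 else mark) 0
  (PySem.List.pyGetD list_lines 0 "", mark)

-- ===== PORT B =====
def checkMark_alt (_line : String) : String × Int :=
  let parts := splitComma _line
  let key := splitComma answerKey
  let answers := parts.drop 1        -- parts[1:] ; exact for start = 1
  let correct := (answers.zip key).countP (fun p => p.1 == p.2)
  let answered := answers.countP (fun a => a != "")
  (parts.headD "", 5 * (correct : Int) - (answered : Int))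

-- ===== PRECONDITION & SPEC =====
-- Pre_ excludes exactly the lines with more than 26 comma-separated fields, on which A raises IndexError.
def Pre_checkMark (_line : String) : Prop := (splitComma _line).length ≤ 26
instance (_line : String) : Decidable (Pre_checkMark _line) := by unfold Pre_checkMark; infer_instance
def pvWitness_checkMark : String := "Alice,B,A,,C"

def Spec_checkMark (_line : String) (out : String × Int) : Prop := out = checkMark_alt _line
instance (_line : String) (out : String × Int) : Decidable (Spec_checkMark _line out) := by unfold Spec_checkMark; infer_instance

-- ===== CLAIM (what is proved, stated in full; the proofs are below) =====
def Claim_equal_checkMark : Prop := ∀ (_line : String), Dom_checkMark _line → Pre_checkMark _line → Spec_checkMark _line (checkMark _line)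

-- ===== LEMMAS AND PROOFS =====

-- A's loop body, on a (answer, key) pair
def stepAB (m : Int) (p : String × String) : Int :=
  let m1 := if p.1 = p.2 then m + 4 else m
  if p.1 ≠ "" ∧ p.1 ≠ p.2 then m1 - 1 else m1

theorem key_entries_ne_empty : ∀ k ∈ splitComma answerKey, k ≠ "" := by decide

theorem key_length : (splitComma answerKey).length = 25 := by decide

-- the +4/-1 accumulation collapses to 5*correct - answered when every key entry is non-empty
theorem fold_step_closed (zs : List (String × String)) (hk : ∀ p ∈ zs, p.2 ≠ "") (m : Int) :
    zs.foldl stepAB m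
      = m + 5 * (zs.countP (fun p => p.1 == p.2) : Int) - (zs.countP (fun p => p.1 != "") : Int) := by
  induction zs generalizing m with
  | nil => simp
  | cons p zs ih =>
    have hp2 : p.2 ≠ "" := hk p (List.mem_cons_self)
    have ih' := ih (fun q hq => hk q (List.mem_cons_of_mem _ hq))
    simp only [List.foldl_cons, List.countP_cons, ih']
    by_cases h1 : p.1 = p.2
    · simp [stepAB, h1, hp2]
      ring
    · by_cases h2 : p.1 = ""
      · simp [stepAB, h2, hp2]
      · simp [stepAB, h1, h2]
        ring

theorem checkMark_spec_aux (_line : String) (hpre : Pre_checkMark _line) :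
    checkMark _line = checkMark_alt _line := by
  unfold checkMark checkMark_alt
  cases hL : splitComma _line with
  | nil =>
      simp [PySem.List.pyGetD, PySem.List.pyGet?, PySem.List.pyIdx?, PySem.List.len,
        PySem.List.pyRange_one_eq_nil]
  | cons hd tail =>
    have hks := key_entries_ne_empty
    have hlen : tail.length ≤ (splitComma answerKey).length := by
      unfold Pre_checkMark at hpre
      rw [hL] at hpre
      rw [key_length]
      simp only [List.length_cons] at hpre
      omega
    refine Prod.ext ?_ ?_
    · show PySem.List.pyGetD (hd :: tail) 0 "" = (hd :: tail).headD ""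
      simp [PySem.List.pyGetD, PySem.List.pyGet?, PySem.List.pyIdx?]
    · show (PySem.List.pyRange 1 (PySem.List.len (hd :: tail)) 1).foldl
            (fun mark i =>
              let a := PySem.List.pyGetD (hd :: tail) i ""
              let k := PySem.List.pyGetD (splitComma answerKey) (i - 1) ""
              let mark := if a = k then mark + 4 else mark
              if a ≠ "" ∧ a ≠ k then mark - 1 else mark) 0
          = 5 * ((tail.zip (splitComma answerKey)).countP (fun p => p.1 == p.2) : Int)
              - (tail.countP (fun a => a != "") : Int)
      set ks := splitComma answerKey with hksdef
      have hzlen : (tail.zip ks).length = tail.length := by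
        simp [List.length_zip]; omega
      set W : List (String × String) := ("", "") :: tail.zip ks with hW
      have hWlen : W.length = tail.length + 1 := by simp [hW, hzlen]
      have hcongr :
          (PySem.List.pyRange 1 (PySem.List.len (hd :: tail)) 1).foldl
            (fun mark i =>
              let a := PySem.List.pyGetD (hd :: tail) i ""
              let k := PySem.List.pyGetD ks (i - 1) ""
              let mark := if a = k then mark + 4 else mark
              if a ≠ "" ∧ a ≠ k then mark - 1 else mark) 0
          = (PySem.List.pyRange 1 (PySem.List.len W) 1).foldl
              (fun mark i => stepAB mark (PySem.List.pyGetD W i ("", ""))) 0 := by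
        have hlenW : PySem.List.len (hd :: tail) = PySem.List.len W := by
          simp [PySem.List.len, hWlen]
        rw [hlenW]
        apply PySem.List.foldl_congr_mem'
        intro i hi m
        obtain ⟨h1i, h2i⟩ := (PySem.List.mem_pyRange_one).mp hi
        obtain ⟨n, rfl⟩ : ∃ n : Nat, i = ((n : Int) + 1) := by
          refine ⟨(i - 1).toNat, ?_⟩; omega
        have hn : n < tail.length := by
          simp [PySem.List.len, hWlen] at h2i; omega
        have hnz : n < (tail.zip ks).length := by omega
        have e1 : PySem.List.pyGetD (hd :: tail) ((n : Int) + 1) "" = tail[n] := by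
          have h : ((n : Int) + 1) = ((n + 1 : Nat) : Int) := by push_cast; ring
          rw [h, PySem.List.pyGetD_natCast]
          simp [List.getD, List.getElem?_cons_succ, List.getElem?_eq_getElem hn]
        have e2 : PySem.List.pyGetD ks ((n : Int) + 1 - 1) "" = ks[n]'(by omega) := by
          have h : ((n : Int) + 1 - 1) = ((n : Nat) : Int) := by omega
          rw [h, PySem.List.pyGetD_natCast]
          have hnk : n < ks.length := by omega
          simp [List.getD, List.getElem?_eq_getElem hnk]
        have e3 : PySem.List.pyGetD W ((n : Int) + 1) ("", "") = (tail.zip ks)[n] := by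
          have h : ((n : Int) + 1) = ((n + 1 : Nat) : Int) := by push_cast; ring
          rw [h, PySem.List.pyGetD_natCast]
          simp [hW, List.getD, List.getElem?_cons_succ, List.getElem?_eq_getElem hnz]
        have ez : (tail.zip ks)[n]'hnz = (tail[n], ks[n]'(by omega)) := by
          simp [List.getElem_zip]
        simp only [e1, e2, e3, ez, stepAB]
      rw [hcongr]
      rw [PySem.List.foldl_pyRange_pyGetD W ("", "") stepAB 0 (by norm_num : (0:Int) ≤ 1)]
      have hdrop : W.drop (Int.toNat 1) = tail.zip ks := by simp [hW]
      rw [hdrop, fold_step_closed (tail.zip ks)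
        (fun p hp => hks p.2 (List.of_mem_zip hp).2)]
      have hcnt : tail.countP (fun a => a != "")
          = (tail.zip ks).countP (fun p => p.1 != "") := by
        conv_lhs => rw [← List.map_fst_zip hlen]
        rw [List.countP_map]
        rfl
      rw [hcnt]
      ring

-- ===== VERDICT (by name: the statement is the Claim_ definition above) =====
theorem checkMark_spec : Claim_equal_checkMark := by
  intro _line _ hpre
  unfold Spec_checkMark
  exact checkMark_spec_aux _line hpre
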